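-- pv_equiv track=rewrite | github.com/kingdomoVuigeil/AR4Rumba | AR4 HMI interface 3.0 source/dijkstra.py | getNewPermutation
-- ===== SOURCE A (Python) =====
-- def getNewPermutation(permutation3times3, piece, piece_value):
--     """returns a 3x3 Matrix
--     basically just adds a single Integer into the matrix
--     """
--
--     for col in range(3):
--         for row in range(3):
--             if permutation3times3[col][row] == 0:
--                 if piece == 0:
--                     permutation3times3[col][row] = piece_value
--                     return permutation3times3
--                 else:
--                     piece -= 1
--     print ('no Permutation found')
-- ===== SOURCE B (Python) =====
-- def getNewPermutation(permutation3times3, piece, piece_value):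
--     """returns a 3x3 Matrix
--     basically just adds a single Integer into the matrix
--     """
--     positions = [(c, r) for c in range(3) for r in range(3)
--                  if permutation3times3[c][r] == 0]
--     if 0 <= piece < len(positions):
--         c, r = positions[piece]
--         permutation3times3[c][r] = piece_value
--         return permutation3times3
--     print('no Permutation found')
-- ===== Notes on version B (the rewrite author's own statement) =====
-- stated objective: simpler
-- what changed: B collects the coordinates of all empty cells once and indexes that list by piece, replacing A's nested scan with an in-loop decrementing counter and early return.
-- outside the precondition, e.g. on getNewPermutation([[0]], 0, 5): A returns [[5]], B raises IndexError
import Mathlib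
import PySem

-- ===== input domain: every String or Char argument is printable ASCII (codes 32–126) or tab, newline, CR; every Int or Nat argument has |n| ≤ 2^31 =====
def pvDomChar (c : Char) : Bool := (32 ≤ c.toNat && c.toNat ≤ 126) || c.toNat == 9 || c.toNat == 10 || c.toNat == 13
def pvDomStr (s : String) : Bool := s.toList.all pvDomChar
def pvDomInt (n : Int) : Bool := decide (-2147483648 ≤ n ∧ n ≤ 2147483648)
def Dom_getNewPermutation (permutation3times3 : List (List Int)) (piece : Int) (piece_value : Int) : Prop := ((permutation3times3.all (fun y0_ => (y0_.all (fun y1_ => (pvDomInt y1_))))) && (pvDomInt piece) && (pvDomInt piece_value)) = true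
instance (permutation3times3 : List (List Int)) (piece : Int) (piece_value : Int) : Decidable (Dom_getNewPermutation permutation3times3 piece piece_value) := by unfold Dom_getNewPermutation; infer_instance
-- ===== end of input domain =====

-- B replaces A's nested scan with a decrementing counter by collecting the empty-cell
-- coordinates once and indexing that list by piece (objective: simpler).
-- Note: the Python functions mutate the grid in place; the equivalence proved here is
-- about the RETURN value only (both return the mutated grid or None).

-- range(3) × range(3) in A's col-then-row traversal order (shared coordinate table)
def pvCells : List (Nat × Nat) :=
  [(0,0),(0,1),(0,2),(1,0),(1,1),(1,2),(2,0),(2,1),(2,2)]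

-- permutation3times3[c][r]  (in-range under Pre_, so the getD defaults never fire)
def pvCell (g : List (List Int)) (c r : Nat) : Int :=
  (PySem.List.pyGet? ((PySem.List.pyGet? g (c : Int)).getD []) (r : Int)).getD 0

-- permutation3times3[c][r] = v  (the single in-place write, as a functional update)
def pvSetCell (g : List (List Int)) (c r : Nat) (v : Int) : List (List Int) :=
  g.set c (((PySem.List.pyGet? g (c : Int)).getD []).set r v)

-- ===== PORT A =====
-- A's nested for-loops with early return and the mutable counter `piece`
def pvGoA (g : List (List Int)) (piece_value : Int) :
    List (Nat × Nat) → Int → Option (List (List Int))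
  | [], _ => none                      -- fall through: print, return None
  | (c, r) :: rest, piece =>
      if pvCell g c r = 0 then
        if piece = 0 then some (pvSetCell g c r piece_value)
        else pvGoA g piece_value rest (piece - 1)
      else pvGoA g piece_value rest piece

def getNewPermutation (permutation3times3 : List (List Int)) (piece : Int) (piece_value : Int) : Option (List (List Int)) :=
  pvGoA permutation3times3 piece_value pvCells piece

-- ===== PORT B =====
def getNewPermutation_alt (permutation3times3 : List (List Int)) (piece : Int) (piece_value : Int) : Option (List (List Int)) :=
  let positions := pvCells.filter (fun p => pvCell permutation3times3 p.1 p.2 = 0)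
  if 0 ≤ piece ∧ piece < (positions.length : Int) then
    match PySem.List.pyGet? positions piece with
    | some (c, r) => some (pvSetCell permutation3times3 c r piece_value)
    | none => none
  else none                            -- print, return None

-- ===== PRECONDITION & SPEC =====
-- Pre_ excludes grids without 3 rows of length ≥ 3: Python A raises IndexError on the
-- cell access unless it happens to return before reaching the missing index, and B
-- (which always builds the full positions list first) raises there too.
def Pre_getNewPermutation (permutation3times3 : List (List Int)) (piece : Int) (piece_value : Int) : Prop :=
  3 ≤ permutation3times3.length ∧ ∀ row ∈ permutation3times3.take 3, 3 ≤ row.length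
instance (permutation3times3 : List (List Int)) (piece : Int) (piece_value : Int) : Decidable (Pre_getNewPermutation permutation3times3 piece piece_value) := by unfold Pre_getNewPermutation; infer_instance

def pvWitness_getNewPermutation : List (List Int) × Int × Int :=
  ([[1, 0, 2], [0, 0, 3], [4, 5, 0]], 2, 7)

def Spec_getNewPermutation (permutation3times3 : List (List Int)) (piece : Int) (piece_value : Int) (out : Option (List (List Int))) : Prop := out = getNewPermutation_alt permutation3times3 piece piece_value
instance (permutation3times3 : List (List Int)) (piece : Int) (piece_value : Int) (out : Option (List (List Int))) : Decidable (Spec_getNewPermutation permutation3times3 piece piece_value out) := by unfold Spec_getNewPermutation; infer_instance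

-- ===== CLAIM (what is proved, stated in full; the proofs are below) =====
def Claim_equal_getNewPermutation : Prop := ∀ (permutation3times3 : List (List Int)) (piece : Int) (piece_value : Int), Dom_getNewPermutation permutation3times3 piece piece_value → Pre_getNewPermutation permutation3times3 piece piece_value → Spec_getNewPermutation permutation3times3 piece piece_value (getNewPermutation permutation3times3 piece piece_value)

-- ===== LEMMAS AND PROOFS =====

-- The scan-with-counter over any coordinate list equals filter-then-index.
theorem pvGoA_eq_filter (g : List (List Int)) (v : Int) :
    ∀ (cells : List (Nat × Nat)) (piece : Int),
      pvGoA g v cells piece =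
        (let ps := cells.filter (fun p => pvCell g p.1 p.2 = 0)
         if 0 ≤ piece ∧ piece < (ps.length : Int) then
           match PySem.List.pyGet? ps piece with
           | some (c, r) => some (pvSetCell g c r v)
           | none => none
         else none) := by
  intro cells
  induction cells with
  | nil =>
      intro piece
      simp only [pvGoA, List.filter_nil, List.length_nil, Int.natCast_zero]
      rw [if_neg (by omega)]
  | cons hd tl ih =>
      intro piece
      obtain ⟨c, r⟩ := hd
      by_cases hz : pvCell g c r = 0
      · simp only [pvGoA, List.filter_cons, hz, if_pos, decide_true, List.length_cons]
        by_cases hp : piece = 0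
        · subst hp
          simp
        · rw [if_neg hp, ih (piece - 1)]
          simp only []
          by_cases hle : 0 ≤ piece - 1
          · have hpos : 0 ≤ piece := by omega
            have : PySem.List.pyGet? ((c, r) :: List.filter (fun p => decide (pvCell g p.1 p.2 = 0)) tl) piece
                 = PySem.List.pyGet? (List.filter (fun p => decide (pvCell g p.1 p.2 = 0)) tl) (piece - 1) := by
              have h1 : piece = ((piece - 1).toNat : Int) + 1 := by omega
              rw [h1, PySem.List.pyGet?_cons_succ]
              congr 1
              omega
            rw [this]
            by_cases hlt : piece - 1 < ((List.filter (fun p => decide (pvCell g p.1 p.2 = 0)) tl).length : Int)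
            · rw [if_pos ⟨hle, hlt⟩, if_pos ⟨hpos, by push_cast; omega⟩]
            · rw [if_neg (by omega), if_neg (by push_cast; omega)]
          · rw [if_neg (by omega), if_neg (by omega)]
      · simp only [pvGoA, List.filter_cons, hz, decide_false]
        exact ih piece

theorem getNewPermutation_spec : Claim_equal_getNewPermutation := by
  intro g piece v _ _
  unfold Spec_getNewPermutation getNewPermutation getNewPermutation_alt
  exact pvGoA_eq_filter g v pvCells piece
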